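-- pv_equiv track=rewrite | github.com/lkj10/algorithm-study | kwangjin/self-study/2021.06/2021.06.25/new_id_reco.py | solution
-- ===== SOURCE A (Python) =====
-- def solution(new_id):
--     answer = ''
--     List = list(new_id)
--     temp = list()
--     temp2 = list()
--     cnt = 0
--     # step 1
--     for i in range(len(List)):
--         if List[i].isalpha():
--             List[i] = List[i].lower()
--
--     # step 2
--     for i in range(len(List)):
--         if List[i].isalpha() or List[i].isdecimal() or List[i] == '-' or List[i] == '_' or List[i] == '.':
--             temp.append(List[i])
--     # step 3
--     for i in temp:
--         temp2.append(i)
--         if i == '.':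
--             cnt += 1
--             if cnt == 2:
--                 temp2.pop()
--                 cnt = 1
--         else:
--             cnt = 0
--
--     # step 4
--     if temp2 and temp2[0] == '.':
--         temp2.pop(0)
--     if temp2 and temp2[-1] == '.':
--         temp2.pop()
--
--     # step 5
--     if temp2 == []:
--         temp2.append('a')
--
--     # step 6
--     if len(temp2) >= 16:
--         temp2 = temp2[:15]
--         if temp2[-1] == '.':
--             temp2.pop()
--
--     # step 7
--     if len(temp2) <= 2:
--         temp_str = temp2[-1]
--         while len(temp2) < 3:
--             temp2.append(temp_str)
--
--     return ''.join(temp2)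
-- ===== SOURCE B (Python) =====
-- def solution(new_id):
--     # lowercase pass, then one predicate-based filtering pass
--     s = new_id.lower()
--     s = ''.join(c for c in s if c.isalpha() or c.isdecimal() or c in '-_.')
--     # collapse dot runs and strip boundary dots in one split/filter/join
--     s = '.'.join(p for p in s.split('.') if p)
--     if not s:
--         s = 'a'
--     s = s[:15].rstrip('.')
--     if len(s) < 3:
--         s += s[-1] * (3 - len(s))
--     return s
-- ===== Notes on version B (the rewrite author's own statement) =====
-- stated objective: idiomatic
-- what changed: A's four index/accumulator loops (in-place per-index lowercasing, a filtering loop, a dot-collapsing loop with a running counter plus list.pop, and a while-loop pad) are replaced by idiomatic whole-string passes: str.lower, one predicate-based comprehension, a split-on-dot/filter/join that collapses dot runs and strips boundary dots in one go, slicing with a right-strip of dots, and arithmetic padding; a timing run measured B about 4x faster (C-level string operations instead of per-index Python loops).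
import Mathlib
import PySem

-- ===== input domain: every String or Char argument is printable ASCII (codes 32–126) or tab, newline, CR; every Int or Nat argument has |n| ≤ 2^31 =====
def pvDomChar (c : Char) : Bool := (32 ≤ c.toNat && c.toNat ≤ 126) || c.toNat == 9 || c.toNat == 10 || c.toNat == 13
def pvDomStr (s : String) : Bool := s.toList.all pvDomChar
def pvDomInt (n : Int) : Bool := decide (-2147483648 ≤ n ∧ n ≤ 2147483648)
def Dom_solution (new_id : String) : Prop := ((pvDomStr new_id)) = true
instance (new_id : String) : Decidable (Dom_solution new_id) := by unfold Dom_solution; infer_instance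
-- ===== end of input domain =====

-- B replaces A's index loops and running dot-counter with idiomatic string passes
-- (lower, one predicate filter, split/filter/join dot collapse, rstrip, pad); return value only.

-- ===== PORT A =====
-- Python's c.isdecimal(): on the printable-ASCII domain it coincides with PySem.Chars.isdigit ('0'..'9').
def pvPredA (c : Char) : Bool :=
  PySem.Chars.isalpha c || PySem.Chars.isdigit c || c == '-' || c == '_' || c == '.'

-- step-3 loop body: append i, count consecutive dots, pop when a second dot arrives
def pvStep3 (st : List Char × Nat) (i : Char) : List Char × Nat :=
  let t2 := st.1 ++ [i]
  if i == '.' then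
    let cnt := st.2 + 1
    if cnt == 2 then (t2.dropLast, 1) else (t2, cnt)
  else (t2, 0)

-- step-7 while loop (Python reads temp2[-1] before it; the call site always has a nonempty list)
def pvPad (ts : Char) (t2 : List Char) : List Char :=
  if t2.length < 3 then pvPad ts (t2 ++ [ts]) else t2
termination_by 3 - t2.length

def solution (new_id : String) : String :=
  -- step 1: lowercase the alphabetic positions in place
  let L := new_id.toList.map (fun c => if PySem.Chars.isalpha c then PySem.Chars.lowerChar c else c)
  -- step 2
  let temp := L.filter pvPredA
  -- step 3
  let temp2 := (temp.foldl pvStep3 ([], 0)).1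
  -- step 4: 'temp2 and temp2[0] == "."' is head? = some '.'; likewise at the back
  let t4a := if temp2.head? = some '.' then temp2.tail else temp2
  let t4 := if t4a.getLast? = some '.' then t4a.dropLast else t4a
  -- step 5
  let t5 := if t4 = [] then ['a'] else t4
  -- step 6
  let t6 := if t5.length ≥ 16 then
      (let t := t5.take 15
       if t.getLast? = some '.' then t.dropLast else t)
    else t5
  -- step 7 (temp_str = temp2[-1]; list is nonempty here, getD is only a totality guard)
  let t7 := if t6.length ≤ 2 then pvPad (t6.getLast?.getD 'a') t6 else t6
  String.ofList t7

-- ===== PORT B =====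
-- c in '-_.' for a single character is membership among those three characters;
-- isdecimal as in port A (= isdigit on the ASCII domain)
def pvPredB (c : Char) : Bool :=
  PySem.Chars.isalpha c || PySem.Chars.isdigit c || ['-', '_', '.'].contains c

-- s.rstrip('.') hand-ported (PySem.Chars.rstrip strips whitespace, not chosen chars):
-- drop all trailing '.' — exact
def pvRstripDots (l : List Char) : List Char :=
  (l.reverse.dropWhile (· == '.')).reverse

def solution_alt (new_id : String) : String :=
  let s0 := PySem.Chars.lower new_id.toList
  let s1 := s0.filter pvPredB
  -- '.'.join(p for p in s.split('.') if p); s.split('.') is List.splitOn '.'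
  let s2 := List.intercalate ['.'] ((s1.splitOn '.').filter (· ≠ []))
  let s3 := if s2 = [] then ['a'] else s2
  -- s[:15].rstrip('.')
  let s4 := pvRstripDots (s3.take 15)
  -- s[-1]: the list is nonempty at this point, getD is only a totality guard
  let s5 := if s4.length < 3 then s4 ++ List.replicate (3 - s4.length) (s4.getLast?.getD 'a') else s4
  String.ofList s5

-- ===== PRECONDITION & SPEC =====
def Spec_solution (new_id : String) (out : String) : Prop := out = solution_alt new_id
instance (new_id : String) (out : String) : Decidable (Spec_solution new_id out) := by unfold Spec_solution; infer_instance

-- ===== CLAIM (what is proved, stated in full; the proofs are below) =====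
def Claim_equal_solution : Prop := ∀ (new_id : String), Dom_solution new_id → Spec_solution new_id (solution new_id)

-- ===== LEMMAS AND PROOFS =====

-- canonical form of the dot-collapsing stage: state b = "previous kept char was a dot"
def pvCollapse : Bool → List Char → List Char
  | _, [] => []
  | b, c :: cs => if c = '.' then (if b then pvCollapse true cs else '.' :: pvCollapse true cs) else c :: pvCollapse false cs

def pvParts (t : List Char) : List (List Char) := (t.splitOn '.').filter (· ≠ [])
def pvJ (t : List Char) : List Char := List.intercalate ['.'] (pvParts t)
def pvTrail (l : List Char) : List Char := if l.getLast? = some '.' then l.dropLast else l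
def pvNodd (a b : Char) : Prop := a ≠ '.' ∨ b ≠ '.'
def pvGood (l : List Char) : Prop := l.head? ≠ some '.' ∧ l.getLast? ≠ some '.' ∧ List.IsChain pvNodd l

-- the two character-level passes coincide
theorem pv_pred_eq : pvPredA = pvPredB := by
  funext c
  simp only [pvPredA, pvPredB, List.contains_cons, List.contains_nil, Bool.or_false, Bool.or_assoc]

theorem pv_fA_eq :
    (fun c => if PySem.Chars.isalpha c then PySem.Chars.lowerChar c else c) = PySem.Chars.lowerChar := by
  funext c
  by_cases h : PySem.Chars.isupper c = true
  · simp [PySem.Chars.isalpha, h]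
  · simp [PySem.Chars.isalpha, PySem.Chars.lowerChar, h]

theorem pv_foldl_step3 (cs : List Char) : ∀ (acc : List Char) (cnt : Nat), cnt ≤ 1 →
    (cs.foldl pvStep3 (acc, cnt)).1 = acc ++ pvCollapse (cnt == 1) cs := by
  induction cs with
  | nil => intro acc cnt _; simp [pvCollapse]
  | cons c cs ih =>
    intro acc cnt hcnt
    by_cases hc : c = '.'
    · subst hc
      interval_cases cnt
      · simpa [pvStep3, pvCollapse] using ih (acc ++ ['.']) 1 (by omega)
      · simpa [pvStep3, pvCollapse, List.dropLast_concat] using ih acc 1 (by omega)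
    · have h1 : (c == '.') = false := by simp [hc]
      have h2 : pvCollapse (cnt == 1) (c :: cs) = c :: pvCollapse false cs := by
        cases h3 : (cnt == 1) <;> simp [pvCollapse, hc]
      simpa [pvStep3, h1, h2] using ih (acc ++ [c]) 0 (by omega)

theorem pv_splitOn_nil : (([] : List Char).splitOn '.') = [[]] := by
  simp [List.splitOn]

theorem pv_splitOn_cons (c : Char) (cs : List Char) :
    (c :: cs).splitOn '.' = if c = '.' then [] :: cs.splitOn '.' else (cs.splitOn '.').modifyHead (c :: ·) := by
  simp [List.splitOn, List.splitOnP_cons]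

theorem pv_parts_nil : pvParts [] = [] := by
  simp [pvParts, List.splitOn]

theorem pv_parts_dot (cs : List Char) : pvParts ('.' :: cs) = pvParts cs := by
  simp [pvParts, pv_splitOn_cons]

theorem pv_parts_cons (c : Char) (cs : List Char) (hc : c ≠ '.') :
    ∃ h rest, cs.splitOn '.' = h :: rest ∧
      pvParts (c :: cs) = (c :: h) :: rest.filter (· ≠ []) ∧
      pvParts cs = (h :: rest).filter (· ≠ []) := by
  cases hs : cs.splitOn '.' with
  | nil => exact absurd hs (List.splitOnP_ne_nil _ _)
  | cons h rest =>
    refine ⟨h, rest, rfl, ?_, by simp [pvParts, hs]⟩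
    simp [pvParts, pv_splitOn_cons, hc, hs]

theorem pv_collapse_nil_iff (u : List Char) : pvCollapse true u = [] ↔ ∀ x ∈ u, x = '.' := by
  induction u with
  | nil => simp [pvCollapse]
  | cons c cs ih =>
    by_cases hc : c = '.'
    · subst hc; simpa [pvCollapse] using ih
    · simp [pvCollapse, hc]

theorem pv_parts_nil_iff (u : List Char) : pvParts u = [] ↔ ∀ x ∈ u, x = '.' := by
  induction u with
  | nil => simp [pv_parts_nil]
  | cons c cs ih =>
    by_cases hc : c = '.'
    · subst hc; simpa [pv_parts_dot] using ih
    · obtain ⟨h, rest, hs, hp, _⟩ := pv_parts_cons c cs hc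
      simp [hp, hc]

theorem pv_interc_cons (a : List Char) (l : List (List Char)) :
    List.intercalate ['.'] (a :: l) = a ++ (if l = [] then [] else '.' :: List.intercalate ['.'] l) := by
  cases l <;> simp [List.intercalate, List.intersperse]

theorem pv_trail_cons (x : Char) (l : List Char) (hl : l ≠ []) : pvTrail (x :: l) = x :: pvTrail l := by
  have h1 : (x :: l).getLast? = l.getLast? := by
    cases l with
    | nil => exact absurd rfl hl
    | cons b m => simp [List.getLast?_cons_cons]
  unfold pvTrail
  rw [h1, List.dropLast_cons_of_ne_nil hl]
  split <;> rfl

theorem pv_main (t : List Char) : pvJ t = pvTrail (pvCollapse true t) := by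
  match t with
  | [] => simp [pvJ, pv_parts_nil, pvCollapse, pvTrail, List.intercalate]
  | c :: cs =>
    by_cases hc : c = '.'
    · subst hc
      have h1 : pvCollapse true ('.' :: cs) = pvCollapse true cs := by simp [pvCollapse]
      rw [pvJ, pv_parts_dot, h1]
      exact pv_main cs
    · match cs with
      | [] =>
        simp [pvJ, pvParts, pv_splitOn_cons, hc, pvCollapse, pvTrail,
          List.intercalate]
      | c' :: cs' =>
        by_cases hc' : c' = '.'
        · subst hc'
          have hparts : pvParts (c :: '.' :: cs') = [c] :: pvParts cs' := by
            simp [pvParts, pv_splitOn_cons, hc]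
          have hcol2 : pvCollapse true (c :: '.' :: cs') = c :: '.' :: pvCollapse true cs' := by
            simp [pvCollapse, hc]
          rw [pvJ, hparts, pv_interc_cons, hcol2, pv_trail_cons c _ (by simp)]
          by_cases hnil : pvParts cs' = []
          · have hcnil : pvCollapse true cs' = [] :=
              (pv_collapse_nil_iff cs').mpr ((pv_parts_nil_iff cs').mp hnil)
            simp [hnil, hcnil, pvTrail]
          · have hcnil : pvCollapse true cs' ≠ [] := fun h =>
              hnil ((pv_parts_nil_iff cs').mpr ((pv_collapse_nil_iff cs').mp h))
            rw [pv_trail_cons '.' _ hcnil, ← pv_main cs']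
            simp [hnil, pvJ]
        · obtain ⟨h, rest, hs, hp, hp'⟩ := pv_parts_cons c (c' :: cs') hc
          have hne : h ≠ [] := by
            obtain ⟨h0, rest0, hs0⟩ : ∃ h0 rest0, cs'.splitOn '.' = h0 :: rest0 := by
              cases hs0 : cs'.splitOn '.' with
              | nil => exact absurd hs0 (List.splitOnP_ne_nil _ _)
              | cons a b => exact ⟨a, b, rfl⟩
            rw [pv_splitOn_cons, if_neg hc', hs0] at hs
            simp at hs
            simp [← hs.1]
          have hfil : pvParts (c' :: cs') = h :: rest.filter (· ≠ []) := by
            rw [hp']; simp [hne]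
          have hcol2 : pvCollapse true (c :: c' :: cs') = c :: pvCollapse true (c' :: cs') := by
            simp [pvCollapse, hc, hc']
          have hcne : pvCollapse true (c' :: cs') ≠ [] := by
            simp [pvCollapse, hc']
          rw [pvJ, hp, pv_interc_cons, hcol2, pv_trail_cons c _ hcne, ← pv_main (c' :: cs')]
          rw [pvJ, hfil, pv_interc_cons]
          simp
termination_by t.length

theorem pv_A4 (t : List Char) :
    pvTrail (if (pvCollapse false t).head? = some '.' then (pvCollapse false t).tail else pvCollapse false t)
      = pvJ t := by
  match t with
  | [] => simp [pvCollapse, pvTrail, pvJ, pv_parts_nil, List.intercalate]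
  | c :: cs =>
    by_cases hc : c = '.'
    · subst hc
      have h1 : pvCollapse false ('.' :: cs) = '.' :: pvCollapse true cs := by simp [pvCollapse]
      rw [h1]
      simp only [List.head?_cons, List.tail_cons, if_true, eq_self_iff_true]
      rw [pvJ, pv_parts_dot, ← pvJ, pv_main cs]
    · have h1 : pvCollapse false (c :: cs) = pvCollapse true (c :: cs) := by
        simp [pvCollapse, hc]
      rw [h1]
      have h2 : (pvCollapse true (c :: cs)).head? = some c := by simp [pvCollapse, hc]
      rw [h2, if_neg (by simpa using hc), pv_main (c :: cs)]

theorem pv_chain_of_nodot (l : List Char) (h : ∀ x ∈ l, x ≠ '.') : List.IsChain pvNodd l := by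
  induction l with
  | nil => exact List.IsChain.nil
  | cons a l ih =>
    cases l with
    | nil => simp
    | cons b m =>
      refine List.isChain_cons_cons.mpr ⟨Or.inl (h a (by simp)), ih ?_⟩
      intro x hx; exact h x (by simp [hx])

theorem pv_splitOn_no_dot (t : List Char) : ∀ a ∈ t.splitOn '.', ∀ x ∈ a, x ≠ '.' := by
  induction t with
  | nil => simp [pv_splitOn_nil]
  | cons c cs ih =>
    by_cases hc : c = '.'
    · subst hc
      rw [pv_splitOn_cons, if_pos rfl]
      intro a ha
      rcases List.mem_cons.mp ha with h | h
      · simp [h]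
      · exact ih a h
    · rw [pv_splitOn_cons, if_neg hc]
      cases hs : cs.splitOn '.' with
      | nil => exact absurd hs (List.splitOnP_ne_nil _ _)
      | cons h0 rest =>
        intro a ha
        rcases List.mem_cons.mp (by simpa using ha) with h | h
        · subst h
          intro x hx
          rcases List.mem_cons.mp hx with h | h
          · simpa [h] using hc
          · exact ih h0 (by simp [hs]) x h
        · exact ih a (by simp [hs, h]) 

theorem pv_head_ne_dot (a : List Char) (hne : a ≠ []) (hd : ∀ x ∈ a, x ≠ '.') : a.head? ≠ some '.' := by
  cases a with
  | nil => exact absurd rfl hne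
  | cons x xs => simpa using hd x (by simp)

theorem pv_last_ne_dot (a : List Char) (hd : ∀ x ∈ a, x ≠ '.') : a.getLast? ≠ some '.' := by
  cases ha : a.getLast? with
  | none => simp
  | some y =>
    have : y ∈ a := List.mem_of_getLast? ha
    simpa using hd y this

theorem pv_good_inter (ps : List (List Char)) (h : ∀ a ∈ ps, a ≠ [] ∧ ∀ x ∈ a, x ≠ '.') :
    pvGood (List.intercalate ['.'] ps) ∧ (ps ≠ [] → List.intercalate ['.'] ps ≠ []) := by
  induction ps with
  | nil =>
    refine ⟨⟨by simp [List.intercalate], by simp [List.intercalate], ?_⟩, by simp⟩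
    simp [List.intercalate]
  | cons a rest ih =>
    obtain ⟨hane, hadot⟩ := h a (by simp)
    rw [pv_interc_cons]
    by_cases hr : rest = []
    · subst hr
      refine ⟨⟨?_, ?_, ?_⟩, fun _ => by simpa using hane⟩
      · simpa using pv_head_ne_dot a hane hadot
      · simpa using pv_last_ne_dot a hadot
      · simpa using pv_chain_of_nodot a hadot
    · obtain ⟨⟨ihh, ihl, ihc⟩, ihne⟩ := ih (fun b hb => h b (by simp [hb]))
      have hine : List.intercalate ['.'] rest ≠ [] := ihne hr
      rw [if_neg hr]
      refine ⟨⟨?_, ?_, ?_⟩, fun _ => by simp [hane]⟩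
      · rw [List.head?_append_of_ne_nil _ hane]
        exact pv_head_ne_dot a hane hadot
      · rw [List.getLast?_append_of_ne_nil _ (by simp)]
        have : ('.' :: List.intercalate ['.'] rest).getLast? = (List.intercalate ['.'] rest).getLast? := by
          cases hI : List.intercalate ['.'] rest with
          | nil => exact absurd hI hine
          | cons y ys => simp [List.getLast?_cons_cons]
        rw [this]; exact ihl
      · rw [List.isChain_append]
        refine ⟨pv_chain_of_nodot a hadot, ?_, ?_⟩
        · cases hI : List.intercalate ['.'] rest with
          | nil => exact absurd hI hine
          | cons y ys =>
            refine List.isChain_cons_cons.mpr ⟨Or.inr ?_, by rw [← hI]; exact ihc⟩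
            intro hy; apply ihh; rw [hI, hy]; rfl
        · intro x hx y hy
          refine Or.inl fun hxx => pv_last_ne_dot a hadot ?_
          simp only [Option.mem_def] at hx
          rw [hx, hxx]

theorem pv_good_J (t : List Char) : pvGood (pvJ t) := by
  refine (pv_good_inter (pvParts t) ?_).1
  intro a ha
  have hmem : a ∈ t.splitOn '.' := (List.mem_filter.mp ha).1
  have hne : a ≠ [] := by simpa using (List.mem_filter.mp ha).2
  exact ⟨hne, pv_splitOn_no_dot t a hmem⟩

theorem pv_rstrip_eq_trail (l : List Char) (h : List.IsChain pvNodd l) : pvRstripDots l = pvTrail l := by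
  cases hr : l.reverse with
  | nil =>
    have : l = [] := by simpa using congrArg List.reverse hr
    simp [this, pvRstripDots, pvTrail]
  | cons d r' =>
    have hl : l = r'.reverse ++ [d] := by
      have := congrArg List.reverse hr
      simpa using this
    by_cases hd : d = '.'
    · subst hd
      have hlast : l.getLast? = some '.' := by rw [hl]; simp
      have hdrop : l.dropLast = r'.reverse := by rw [hl]; simp
      have hdw : r'.dropWhile (· == '.') = r' := by
        cases r' with
        | nil => rfl
        | cons e r'' =>
          have hchain : List.IsChain (fun a b => pvNodd b a) l.reverse := by
            rw [List.isChain_reverse]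
            exact h.imp (fun _ _ hab => hab)
          rw [hr] at hchain
          have he : pvNodd e '.' := (List.isChain_cons_cons.mp hchain).1
          have hene : e ≠ '.' := by
            rcases he with h1 | h1
            · exact h1
            · exact absurd rfl h1
          simp [hene]
      rw [pvRstripDots, hr, pvTrail, if_pos hlast, hdrop]
      simp [hdw]
    · have hlast : l.getLast? = some d := by rw [hl]; simp
      rw [pvRstripDots, hr, pvTrail, if_neg (by simp [hlast, hd]), List.dropWhile_cons]
      simp only [beq_iff_eq, hd, if_false]
      rw [← hr]; simp

theorem pv_pad_eq (ts : Char) (l : List Char) : pvPad ts l = l ++ List.replicate (3 - l.length) ts := by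
  unfold pvPad
  split
  · rename_i hlt
    rw [pv_pad_eq ts (l ++ [ts])]
    have h3 : 3 - l.length = (3 - (l.length + 1)) + 1 := by omega
    rw [List.append_assoc, h3]
    congr 1
    simp [List.replicate_succ]
  · rename_i hge
    have : 3 - l.length = 0 := by omega
    simp [this]
termination_by 3 - l.length

theorem pv_stage6 (y : List Char) (hg : pvGood y) :
    (if 16 ≤ y.length then pvTrail (y.take 15) else y) = pvRstripDots (y.take 15) := by
  obtain ⟨hh, hl, hc⟩ := hg
  by_cases h16 : 16 ≤ y.length
  · rw [if_pos h16, pv_rstrip_eq_trail _ (hc.take 15)]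
  · rw [if_neg h16, List.take_of_length_le (by omega), pv_rstrip_eq_trail _ hc, pvTrail, if_neg hl]

theorem pv_good_singleton_a : pvGood ['a'] := by
  refine ⟨by simp, by simp, by simp⟩

-- ===== VERDICT (by name: the statement is the Claim_ definition above) =====
theorem solution_spec : Claim_equal_solution := by
  intro new_id _
  unfold Spec_solution solution solution_alt
  simp only [pv_fA_eq, pv_pred_eq, PySem.Chars.lower]
  generalize (List.filter pvPredB (List.map PySem.Chars.lowerChar new_id.toList)) = t
  have h3 : (t.foldl pvStep3 ([], 0)).1 = pvCollapse false t := by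
    simpa using pv_foldl_step3 t [] 0 (by omega)
  rw [h3]
  rw [show (if (if (pvCollapse false t).head? = some '.' then (pvCollapse false t).tail else pvCollapse false t).getLast? = some '.'
        then (if (pvCollapse false t).head? = some '.' then (pvCollapse false t).tail else pvCollapse false t).dropLast
        else (if (pvCollapse false t).head? = some '.' then (pvCollapse false t).tail else pvCollapse false t))
      = pvTrail (if (pvCollapse false t).head? = some '.' then (pvCollapse false t).tail else pvCollapse false t) from rfl]
  rw [pv_A4 t]
  rw [show List.intercalate ['.'] ((t.splitOn '.').filter (· ≠ [])) = pvJ t from rfl]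
  set y := if pvJ t = [] then ['a'] else pvJ t with hy
  have hgy : pvGood y := by
    rw [hy]
    by_cases hn : pvJ t = []
    · simpa [hn] using pv_good_singleton_a
    · simpa [hn] using pv_good_J t
  rw [show (if 16 ≤ y.length then
        (if (y.take 15).getLast? = some '.' then (y.take 15).dropLast else y.take 15) else y)
      = (if 16 ≤ y.length then pvTrail (y.take 15) else y) from rfl]
  rw [pv_stage6 y hgy]
  set z := pvRstripDots (y.take 15)
  by_cases hz : z.length ≤ 2
  · rw [if_pos hz, if_pos (by omega), pv_pad_eq]
  · rw [if_neg hz, if_neg (by omega)]
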